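-- pv_equiv track=rewrite | github.com/Marshal1101/DataStructure-Algorithm-Study | baekjoon/StringQuestion/095-16120-PPAP.py | check_ppap
-- ===== SOURCE A (Python) =====
-- from collections import deque
--
-- def check_ppap(string: str) -> bool:
--     stack = deque()
--     is_prevA = False
--     for i in range(len(string)):
--         if string[i] == 'A':
--             if is_prevA: return False
--             is_prevA = True
--         else:
--             if not is_prevA:
--                 stack.append('P')
--             else:
--                 if len(stack) > 1:
--                     stack.pop()
--                     is_prevA = False
--                 else: return False
--
--     if is_prevA or len(stack) > 1: return False
--     else: return True
-- ===== SOURCE B (Python) =====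
-- def check_ppap(string: str) -> bool:
--     # A's scanner treats every character other than 'A' as a 'P'; normalize likewise.
--     s = ''.join('A' if c == 'A' else 'P' for c in string)
--     while 'PPAP' in s:
--         s = s.replace('PPAP', 'P')
--     return s in ('', 'P')
-- ===== Notes on version B (the rewrite author's own statement) =====
-- stated objective: simpler
-- what changed: Replaced the one-pass stack/flag scanner by a term-rewriting reducer: normalize non-'A' chars to 'P' (as A's scanner implicitly does), then repeatedly rewrite 'PPAP' -> 'P' until none remains and accept iff the residue is '' or 'P'.
import Mathlib
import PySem

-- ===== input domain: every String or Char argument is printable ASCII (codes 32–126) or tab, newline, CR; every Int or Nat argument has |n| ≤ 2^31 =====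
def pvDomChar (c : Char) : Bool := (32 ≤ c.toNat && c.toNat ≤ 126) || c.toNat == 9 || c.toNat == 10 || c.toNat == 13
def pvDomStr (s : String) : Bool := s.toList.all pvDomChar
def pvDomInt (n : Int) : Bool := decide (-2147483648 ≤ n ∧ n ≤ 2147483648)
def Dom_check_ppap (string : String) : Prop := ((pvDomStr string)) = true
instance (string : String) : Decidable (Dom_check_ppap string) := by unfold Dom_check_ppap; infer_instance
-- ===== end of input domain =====

-- B replaces A's one-pass stack scanner by a term-rewriting reducer (normalize non-'A' chars
-- to 'P', rewrite 'PPAP' -> 'P' to a fixed point, accept '' or 'P'); same return value, no speed claim.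

-- ===== PORT A =====
-- one step of A's loop body; the state is (stack, is_prevA), none = the function has returned False
def ppapStep (st : Option (List Char × Bool)) (c : Char) : Option (List Char × Bool) :=
  match st with
  | none => none
  | some (stack, isPrevA) =>
    if c = 'A' then
      if isPrevA then none else some (stack, true)
    else
      if !isPrevA then some (stack ++ ['P'], false)
      else if stack.length > 1 then some (stack.dropLast, false) else none

def check_ppap (string : String) : Bool :=
  match (PySem.List.pyRange 0 (PySem.Str.len string) 1).foldl
      (fun st i => ppapStep st (PySem.List.pyGetD string.toList i 'A')) (some ([], false)) with
  | none => false
  | some (stack, isPrevA) => if isPrevA || decide (stack.length > 1) then false else true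

-- ===== PORT B =====
-- the normalisation B's join-comprehension performs on each character
def ppapNorm (c : Char) : Char := if c = 'A' then 'A' else 'P'

-- proof-side characterisation of Python's s.replace('PPAP','P') (left-to-right, non-overlapping);
-- it sits above the port because reduce's termination proof cites reducePPAP_length_lt
def repAll : List Char → List Char
  | 'P' :: 'P' :: 'A' :: 'P' :: t => 'P' :: repAll t
  | c :: t => c :: repAll t
  | [] => []

theorem repAll_length_le (l : List Char) : (repAll l).length ≤ l.length := by
  fun_induction repAll l <;> simp_all
  omega

theorem replace_go_eq (fuel : Nat) (l acc : List Char) (h : l.length ≤ fuel) :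
    PySem.Chars.replace.go ['P','P','A','P'] ['P'] fuel l acc = acc.reverse ++ repAll l := by
  induction fuel generalizing l acc with
  | zero =>
    have : l = [] := by cases l <;> simp_all
    subst this; simp [PySem.Chars.replace.go, repAll]
  | succ f ih =>
    cases l with
    | nil => simp [PySem.Chars.replace.go, repAll]
    | cons c t =>
      rw [PySem.Chars.replace.go]
      by_cases hp : List.isPrefixOf ['P','P','A','P'] (c :: t) = true
      · obtain ⟨r, hr⟩ := (List.isPrefixOf_iff_prefix.mp hp)
        simp only [hp, if_pos]
        have hshape : c :: t = 'P' :: 'P' :: 'A' :: 'P' :: r := by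
          rw [← hr]; rfl
        rw [hshape]
        have hlen : r.length ≤ f := by
          have := congrArg List.length hshape
          simp at this h; omega
        rw [show List.drop (List.length ['P','P','A','P']) ('P'::'P'::'A'::'P'::r) = r from rfl]
        rw [ih r (List.reverse ['P'] ++ acc) hlen]
        simp [repAll]
      · simp only [hp, Bool.false_eq_true, if_neg, not_false_eq_true]
        rw [ih t (c :: acc) (by simp at h ⊢; omega)]
        have : repAll (c :: t) = c :: repAll t := by
          rw [repAll.eq_def]
          split
          · rename_i t' heq
            exact absurd (List.isPrefixOf_iff_prefix.mpr ⟨t', by rw [heq]; rfl⟩) hp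
          · simp_all
          · simp_all
        rw [this]; simp

theorem replace_ppap_eq (s : List Char) :
    PySem.Chars.replace s ['P','P','A','P'] ['P'] = repAll s := by
  rw [PySem.Chars.replace]
  rw [if_neg (by simp)]
  simpa using replace_go_eq s.length s [] le_rfl

theorem repAll_length_lt (l : List Char) (h : ['P','P','A','P'] <:+: l) :
    (repAll l).length < l.length := by
  fun_induction repAll l with
  | case1 t ih =>
    have := repAll_length_le t
    simp; omega
  | case2 c t hne ih =>
    rcases List.infix_cons_iff.mp h with hpre | hinf
    · obtain ⟨r, hr⟩ := hpre
      injection hr with h1 h2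
      exact absurd (hne r h1.symm h2.symm) not_false
    · have := ih hinf
      simp; omega
  | case3 => simp at h

theorem reducePPAP_length_lt (s : List Char)
    (h : PySem.Chars.isIn ['P','P','A','P'] s = true) :
    (PySem.Chars.replace s ['P','P','A','P'] ['P']).length < s.length := by
  rw [replace_ppap_eq]
  exact repAll_length_lt s ((PySem.Chars.isIn_iff_infix _ _).mp h)

def reduce (s : List Char) : List Char :=
  if hin : PySem.Chars.isIn ['P','P','A','P'] s = true then
    reduce (PySem.Chars.replace s ['P','P','A','P'] ['P'])
  else s
termination_by s.length
decreasing_by exact reducePPAP_length_lt s hin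

def check_ppap_alt (string : String) : Bool :=
  let s := reduce (string.toList.map ppapNorm)
  decide (s = [] ∨ s = ['P'])

-- ===== PRECONDITION & SPEC =====
def Spec_check_ppap (string : String) (out : Bool) : Prop := out = check_ppap_alt string
instance (string : String) (out : Bool) : Decidable (Spec_check_ppap string out) := by unfold Spec_check_ppap; infer_instance

-- ===== CLAIM (what is proved, stated in full; the proofs are below) =====
def Claim_equal_check_ppap : Prop := ∀ (string : String), Dom_check_ppap string → Spec_check_ppap string (check_ppap string)

-- ===== LEMMAS AND PROOFS =====
-- running A's automaton over a list of characters
def autRun (st : Option (List Char × Bool)) (l : List Char) : Option (List Char × Bool) :=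
  l.foldl ppapStep st

-- A's verdict from a final state
def accept (l : List Char) : Bool :=
  match autRun (some ([], false)) l with
  | none => false
  | some (stack, isPrevA) => if isPrevA || decide (stack.length > 1) then false else true

theorem autRun_none (l : List Char) : autRun none l = none := by
  induction l with
  | nil => rfl
  | cons c t ih => simpa [autRun, ppapStep] using ih

theorem stepP_false (stack : List Char) :
    ppapStep (some (stack, false)) 'P' = some (stack ++ ['P'], false) := by
  simp [ppapStep]

theorem stepA_false (stack : List Char) :
    ppapStep (some (stack, false)) 'A' = some (stack, true) := by
  simp [ppapStep]

theorem stepP_true (stack : List Char) :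
    ppapStep (some (stack, true)) 'P' =
      if stack.length > 1 then some (stack.dropLast, false) else none := by
  simp [ppapStep]

theorem step4_eq_step1 (st : Option (List Char × Bool)) :
    ppapStep (ppapStep (ppapStep (ppapStep st 'P') 'P') 'A') 'P' = ppapStep st 'P' := by
  match st with
  | none => rfl
  | some (stack, false) =>
    rw [stepP_false, stepP_false, stepA_false, stepP_true]
    rw [if_pos (by simp)]
    simp
  | some (stack, true) =>
    rw [stepP_true]
    by_cases h : stack.length > 1
    · rw [if_pos h, stepP_false, stepA_false, stepP_true]
      rw [if_pos (by simp [List.length_dropLast]; omega)]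
      simp
    · rw [if_neg h]
      rfl

theorem autRun_repAll (l : List Char) (st : Option (List Char × Bool)) :
    autRun st (repAll l) = autRun st l := by
  fun_induction repAll l generalizing st with
  | case1 t ih =>
    show autRun (ppapStep st 'P') (repAll t) = autRun _ t
    rw [ih]
    show autRun (ppapStep st 'P') t =
      autRun (ppapStep (ppapStep (ppapStep (ppapStep st 'P') 'P') 'A') 'P') t
    rw [step4_eq_step1]
  | case2 c t hne ih => exact ih (ppapStep st c)
  | case3 => rfl

theorem autRun_map_norm (l : List Char) (st : Option (List Char × Bool)) :
    autRun st (l.map ppapNorm) = autRun st l := by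
  induction l generalizing st with
  | nil => rfl
  | cons c t ih =>
    show autRun (ppapStep st (ppapNorm c)) (t.map ppapNorm) = autRun (ppapStep st c) t
    rw [ih]
    congr 1
    by_cases h : c = 'A'
    · simp [ppapNorm, h]
    · simp only [ppapNorm, if_neg h]
      match st with
      | none => rfl
      | some (stack, p) => simp [ppapStep, h]

theorem autRun_allP (l : List Char) (st : List Char) (h : ∀ c ∈ l, c = 'P') :
    autRun (some (st, false)) l = some (st ++ List.replicate l.length 'P', false) := by
  induction l generalizing st with
  | nil => simp [autRun]
  | cons c t ih =>
    have hc : c = 'P' := h c (by simp)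
    subst hc
    show autRun (ppapStep (some (st, false)) 'P') t = _
    rw [show ppapStep (some (st, false)) 'P' = some (st ++ ['P'], false) by simp [ppapStep]]
    rw [ih (st ++ ['P']) (fun c hc => h c (by simp [hc]))]
    simp [List.replicate_succ]

theorem repAll_chars (l : List Char) (h : ∀ c ∈ l, c = 'A' ∨ c = 'P') :
    ∀ c ∈ repAll l, c = 'A' ∨ c = 'P' := by
  fun_induction repAll l with
  | case1 t ih =>
    intro c hc
    rcases List.mem_cons.mp hc with h1 | h1
    · right; exact h1
    · exact ih (fun d hd => h d (by simp [hd])) c h1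
  | case2 c t hne ih =>
    intro d hd
    rcases List.mem_cons.mp hd with h1 | h1
    · exact h d (by simp [h1])
    · exact ih (fun e he => h e (by simp [he])) d h1
  | case3 => intro c hc; simp at hc

theorem reduce_aut (l : List Char) (st : Option (List Char × Bool)) :
    autRun st (reduce l) = autRun st l := by
  fun_induction reduce l with
  | case1 s h ih =>
    rw [ih]
    rw [replace_ppap_eq]
    exact autRun_repAll s st
  | case2 s h => rfl

theorem reduce_no_ppap (l : List Char) : ¬ (['P','P','A','P'] <:+: reduce l) := by
  fun_induction reduce l with
  | case1 s h ih => exact ih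
  | case2 s h =>
    intro hinf
    exact h ((PySem.Chars.isIn_iff_infix _ _).mpr hinf)

theorem reduce_chars (l : List Char) :
    (∀ c ∈ l, c = 'A' ∨ c = 'P') → ∀ c ∈ reduce l, c = 'A' ∨ c = 'P' := by
  fun_induction reduce l with
  | case1 s hin ih =>
    intro hall
    exact ih (by rw [replace_ppap_eq]; exact repAll_chars s hall)
  | case2 s hin => exact fun hall => hall

theorem first_A (l : List Char) (hA : 'A' ∈ l) :
    ∃ xs ys, l = xs ++ 'A' :: ys ∧ ∀ c ∈ xs, c ≠ 'A' := by
  induction l with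
  | nil => simp at hA
  | cons c t ih =>
    by_cases hcA : c = 'A'
    · exact ⟨[], t, by simp [hcA], by simp⟩
    · have hAt : 'A' ∈ t := by
        rcases List.mem_cons.mp hA with h1 | h1
        · exact absurd h1.symm hcA
        · exact h1
      obtain ⟨xs, ys, h1, h2⟩ := ih hAt
      exact ⟨c :: xs, ys, by rw [h1]; rfl, by
        intro d hd
        rcases List.mem_cons.mp hd with h3 | h3
        · rw [h3]; exact hcA
        · exact h2 d h3⟩

theorem accept_normal_form (l : List Char) (hc : ∀ c ∈ l, c = 'A' ∨ c = 'P')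
    (hni : ¬ (['P','P','A','P'] <:+: l)) (ha : accept l = true) :
    l = [] ∨ l = ['P'] := by
  by_cases hA : 'A' ∈ l
  · exfalso
    obtain ⟨xs, ys, hsplit, hxsA⟩ := first_A l hA
    have hxsP : ∀ c ∈ xs, c = 'P' := by
      intro c hcx
      have hcl : c ∈ l := by rw [hsplit]; exact List.mem_append_left _ hcx
      rcases hc c hcl with h1 | h1
      · exact absurd h1 (hxsA c hcx)
      · exact h1
    have hrun : autRun (some ([], false)) l
        = autRun (some (List.replicate xs.length 'P', true)) ys := by
      rw [hsplit]
      rw [autRun, List.foldl_append]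
      rw [show xs.foldl ppapStep (some ([], false)) = autRun (some ([], false)) xs from rfl]
      rw [autRun_allP xs [] hxsP]
      show autRun (ppapStep (some (List.replicate xs.length 'P', false)) 'A') ys = _
      rw [show ppapStep (some (List.replicate xs.length 'P', false)) 'A'
            = some (List.replicate xs.length 'P', true) by simp [ppapStep]]
    cases ys with
    | nil =>
      rw [accept, hrun] at ha
      simp [autRun] at ha
    | cons z zs =>
      have hzl : z ∈ l := by
        rw [hsplit]; simp
      rcases hc z hzl with hz | hz
      · -- 'A' then 'A': the run dies
        rw [accept, hrun, hz] at ha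
        rw [show autRun (some (List.replicate xs.length 'P', true)) ('A' :: zs)
              = autRun (ppapStep (some (List.replicate xs.length 'P', true)) 'A') zs from rfl] at ha
        rw [show ppapStep (some (List.replicate xs.length 'P', true)) 'A' = none by simp [ppapStep]] at ha
        rw [autRun_none] at ha
        simp at ha
      · -- 'A' then 'P'
        by_cases hlen : xs.length > 1
        · -- 'PPAP' occurs: contradiction with hni
          apply hni
          obtain ⟨k, hk⟩ : ∃ k, xs = List.replicate k 'P' :=
            ⟨xs.length, List.eq_replicate_of_mem hxsP⟩
          have hkk : k = (k - 2) + 2 := by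
            have := congrArg List.length hk
            simp at this; omega
          have hrep : List.replicate k ('P' : Char) = List.replicate (k - 2) 'P' ++ ['P', 'P'] := by
            conv_lhs => rw [hkk]
            rw [List.replicate_add]; rfl
          refine ⟨List.replicate (k - 2) 'P', zs, ?_⟩
          rw [hsplit, hz, hk, hrep]
          simp
        · -- stack too small: the run dies
          rw [accept, hrun, hz] at ha
          rw [show autRun (some (List.replicate xs.length 'P', true)) ('P' :: zs)
                = autRun (ppapStep (some (List.replicate xs.length 'P', true)) 'P') zs from rfl] at ha
          rw [show ppapStep (some (List.replicate xs.length 'P', true)) 'P' = none by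
            simp [ppapStep]; omega] at ha
          rw [autRun_none] at ha
          simp at ha
  · -- no 'A': all characters are 'P'
    have hP : ∀ c ∈ l, c = 'P' := by
      intro c hcl
      rcases hc c hcl with h1 | h1
      · exact absurd (h1 ▸ hcl) hA
      · exact h1
    rw [accept, autRun_allP l [] hP] at ha
    simp at ha
    have : l.length ≤ 1 := by omega
    interval_cases h : l.length
    · left; exact List.eq_nil_of_length_eq_zero h
    · right
      obtain ⟨c, hcl⟩ := List.length_eq_one_iff.mp h
      rw [hcl]
      rw [hP c (by simp [hcl])]

theorem check_ppap_eq_accept (string : String) :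
    check_ppap string = accept string.toList := by
  rw [check_ppap, accept, autRun]
  rw [show PySem.Str.len string = (string.toList.length : Int) by simp]
  rw [PySem.List.foldl_pyRange_zero_pyGetD' string.toList 'A'
        (fun st c => ppapStep st c) (some ([], false))]

theorem map_norm_chars (l : List Char) : ∀ c ∈ l.map ppapNorm, c = 'A' ∨ c = 'P' := by
  intro c hc
  obtain ⟨d, _, hd⟩ := List.mem_map.mp hc
  rw [← hd, ppapNorm]
  by_cases h : d = 'A' <;> simp [h]

theorem accept_eq_alt (s : String) :
    accept s.toList = check_ppap_alt s := by
  rw [check_ppap_alt]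
  have h1 : accept s.toList = accept (reduce (s.toList.map ppapNorm)) := by
    rw [accept, accept, reduce_aut, autRun_map_norm]
  rw [h1]
  set r := reduce (s.toList.map ppapNorm) with hr
  by_cases h : r = [] ∨ r = ['P']
  · rw [decide_eq_true h]
    rcases h with h | h <;> rw [h] <;> rfl
  · rw [decide_eq_false h]
    cases hacc : accept r with
    | false => rfl
    | true =>
      exact absurd (accept_normal_form r
        (reduce_chars _ (map_norm_chars s.toList)) (reduce_no_ppap _) hacc) h

-- ===== VERDICT (by name: the statement is the Claim_ definition above) =====
theorem check_ppap_spec : Claim_equal_check_ppap := by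
  intro string _
  unfold Spec_check_ppap
  rw [check_ppap_eq_accept, accept_eq_alt]
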